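-- pv_equiv track=rewrite | github.com/lauracagigal/CC_indicators | functions/rain_func.py | count_consecutive_days
-- ===== SOURCE A (Python) =====
-- def count_consecutive_days(series):
--     """
--     Counts the number of consecutive days with rain in a series.
--
--     Args:
--         series (list): A list of boolean values representing rainy days.
--
--     Returns:
--         list: A list containing the count of consecutive rainy days for each day in the series.
--     """
--     count = 0
--     result = []
--     for value in series:
--         if value:
--             count += 1
--         else:
--             count = 0
--         result.append(count)
--     return result
-- ===== SOURCE B (Python) =====
-- from itertools import groupby
--
--
-- def count_consecutive_days(series):
--     result = []
--     for key, grp in groupby(series, key=bool):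
--         n = sum(1 for _ in grp)
--         if key:
--             result.extend(range(1, n + 1))
--         else:
--             result.extend([0] * n)
--     return result
-- ===== Notes on version B (the rewrite author's own statement) =====
-- stated objective: alternative
-- what changed: Replaces the per-element running counter with an itertools.groupby pass that forms maximal runs of equal truthiness and expands each run at once (1..L for rainy runs, L zeros otherwise).
import Mathlib
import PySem

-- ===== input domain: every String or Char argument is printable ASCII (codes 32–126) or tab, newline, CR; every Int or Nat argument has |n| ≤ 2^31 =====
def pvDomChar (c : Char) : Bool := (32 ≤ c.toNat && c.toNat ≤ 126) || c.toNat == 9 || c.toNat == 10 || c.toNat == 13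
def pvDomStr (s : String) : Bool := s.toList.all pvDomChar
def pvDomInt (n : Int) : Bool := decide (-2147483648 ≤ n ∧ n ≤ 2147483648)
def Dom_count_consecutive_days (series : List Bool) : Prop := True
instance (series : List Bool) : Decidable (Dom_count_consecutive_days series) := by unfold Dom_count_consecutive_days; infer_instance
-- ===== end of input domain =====

-- B replaces A's per-element running counter with a groupby-into-runs pass that expands
-- each maximal run at once (alternative decomposition, same O(n) cost).


-- ===== PORT A =====
-- A's loop carrying `count`, appending the new count for each element.
def countGo (count : Int) : List Bool → List Int
  | [] => []
  | v :: t =>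
    let c := if v then count + 1 else 0
    c :: countGo c t

def count_consecutive_days (series : List Bool) : List Int :=
  countGo 0 series

-- ===== PORT B =====
-- itertools.groupby: maximal runs of consecutive equal booleans, as (key, length) pairs.
def groupRuns : List Bool → List (Bool × Nat)
  | [] => []
  | b :: t =>
    (b, (t.takeWhile (· = b)).length + 1) :: groupRuns (t.dropWhile (· = b))
termination_by l => l.length
decreasing_by
  simpa using Nat.lt_succ_of_le (List.length_dropWhile_le _ _)

-- expansion of one run: range(1, n+1) for a rainy run, n zeros otherwise
def expandRun (g : Bool × Nat) : List Int :=
  if g.1 then (List.range g.2).map (fun i => (i : Int) + 1) else List.replicate g.2 0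

def count_consecutive_days_alt (series : List Bool) : List Int :=
  (groupRuns series).foldl (fun result g => result ++ expandRun g) []

-- ===== PRECONDITION & SPEC =====
def Spec_count_consecutive_days (series : List Bool) (out : List Int) : Prop := out = count_consecutive_days_alt series
instance (series : List Bool) (out : List Int) : Decidable (Spec_count_consecutive_days series out) := by unfold Spec_count_consecutive_days; infer_instance

-- ===== CLAIM (what is proved, stated in full; the proofs are below) =====
def Claim_equal_count_consecutive_days : Prop := ∀ (series : List Bool), Dom_count_consecutive_days series → Spec_count_consecutive_days series (count_consecutive_days series)

-- ===== LEMMAS AND PROOFS =====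

theorem alt_eq_flatMap (series : List Bool) :
    count_consecutive_days_alt series = (groupRuns series).flatMap expandRun := by
  unfold count_consecutive_days_alt
  rw [PySem.List.foldl_append_eq_flatMap]
  simp

-- A's loop across a run of trues: counts count+1, …, count+m, then continues with count+m
theorem countGo_true_run (m : Nat) (count : Int) (rest : List Bool) :
    countGo count (List.replicate m true ++ rest) =
      (List.range m).map (fun i => count + (i : Int) + 1) ++ countGo (count + m) rest := by
  induction m generalizing count rest with
  | zero => simp
  | succ n ih =>
    have h : List.replicate (n + 1) true ++ rest = List.replicate n true ++ (true :: rest) := by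
      simp [List.replicate_succ']
    rw [h, ih, List.range_succ]
    simp [countGo, List.append_assoc, Nat.cast_add, Nat.cast_one]
    ring_nf

-- A's loop across a run of falses, starting from any count: zeros, continuing with count 0
theorem countGo_false_run (m : Nat) (count : Int) (rest : List Bool) (hm : 1 ≤ m) :
    countGo count (List.replicate m false ++ rest) =
      List.replicate m (0 : Int) ++ countGo 0 rest := by
  induction m generalizing count rest with
  | zero => omega
  | succ n ih =>
    simp only [List.replicate_succ, List.cons_append, countGo, Bool.false_eq_true,
      if_false]
    rcases Nat.eq_zero_or_pos n with h | h
    · subst h; simp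
    · rw [ih 0 rest h]

theorem takeWhile_eq_replicate (b : Bool) (t : List Bool) :
    t.takeWhile (· = b) = List.replicate (t.takeWhile (· = b)).length b := by
  apply List.eq_replicate_of_mem
  intro x hx
  have := List.mem_takeWhile_imp hx
  simpa using this

-- the main loop-vs-runs correspondence, by the recursion structure of groupRuns
theorem countGo_zero_eq_expand (series : List Bool) :
    countGo 0 series = (groupRuns series).flatMap expandRun := by
  generalize hn : series.length = n
  induction n using Nat.strong_induction_on generalizing series with
  | _ n ih =>
  cases series with
  | nil => rw [groupRuns.eq_def]; simp [countGo]
  | cons b t =>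
    rw [groupRuns.eq_def]
    have hih : countGo 0 (t.dropWhile (· = b)) =
        (groupRuns (t.dropWhile (· = b))).flatMap expandRun := by
      apply ih (t.dropWhile (· = b)).length _ _ rfl
      subst hn
      simpa using Nat.lt_succ_of_le (List.length_dropWhile_le _ _)
    have hsplit : b :: t =
        List.replicate ((t.takeWhile (· = b)).length + 1) b ++ t.dropWhile (· = b) := by
      conv_lhs => rw [← List.takeWhile_append_dropWhile (p := (· = b)) (l := t)]
      rw [List.replicate_succ, ← takeWhile_eq_replicate]
      simp
    simp only [List.flatMap_cons, ← hih]
    cases b with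
    | false =>
      rw [hsplit, countGo_false_run _ 0 _ (Nat.succ_le_succ (Nat.zero_le _))]
      simp [expandRun]
    | true =>
      rw [hsplit, countGo_true_run]
      simp only [expandRun, if_true, zero_add]
      congr 1
      -- after a maximal true-run the next element (if any) is false, so the count resets
      cases hdrop : t.dropWhile (· = true) with
      | nil => simp [countGo]
      | cons x r =>
        have hx : ¬ (x = true) := by
          have := List.head?_dropWhile_not (p := (· = true)) (l := t)
          rw [hdrop] at this
          simpa using this
        simp only [countGo, if_neg hx]

-- ===== VERDICT (by name: the statement is the Claim_ definition above) =====
theorem count_consecutive_days_spec : Claim_equal_count_consecutive_days := by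
  intro series _
  unfold Spec_count_consecutive_days count_consecutive_days
  rw [alt_eq_flatMap, countGo_zero_eq_expand]
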